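-- pv_equiv track=rewrite | github.com/ArminBaz/CSCI-561 | hw2/main.py | find_dead_tiles
-- ===== SOURCE A (Python) =====
-- def find_dead_tiles(board, tile_type):
--     dead_tiles = []
--     for i in range(5):
--         for j in range(5):
--             if board[i][j] == tile_type:
--                 if not find_liberty(board, i, j):
--                     dead_tiles.append((i, j))
--     return dead_tiles
--
-- def remove_dead_tiles(board, tile_type):
--     dead_tiles = find_dead_tiles(board, tile_type)
--     if not dead_tiles:
--         return board
--     new_board = remove_certain_tiles(board, dead_tiles)
--     return new_board
--
-- def remove_certain_tiles(board, locations):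
--     for tile in locations:
--         board[tile[0]][tile[1]] = 0
--     return board
--
-- def ally_dfs(board, i, j):
--     pos = (i,j)
--     arr = [(i, j)]
--     ally_members = []
--     while arr:
--         piece = arr.pop()
--         ally_members.append(piece)
--         neighbor_allies = detect_neighbor_ally(board, piece[0], piece[1])
--         for ally in neighbor_allies:
--             if ally not in arr and ally not in ally_members:
--                 arr.append(ally)
--     return ally_members
--
-- def detect_neighbor(board, i, j):
--     neighbors = []
--     board = remove_dead_tiles(board, (i, j))
--     if i > 0:
--         neighbors.append((i - 1, j))
--     if i < len(board) - 1:
--         neighbors.append((i + 1, j))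
--     if j > 0:
--         neighbors.append((i, j - 1))
--     if j < len(board) - 1:
--         neighbors.append((i, j + 1))
--     return neighbors
--
-- def detect_neighbor_ally(board, r, c):
--     neighbors = detect_neighbor(board, r, c)
--     group_allies = []
--
--     for piece in neighbors:
--
--         if board[piece[0]][piece[1]] == board[r][c]:
--             group_allies.append(piece)
--     return group_allies
--
-- def find_liberty(board, row, col):
--     count = 0
--
--     ally_members = ally_dfs(board, row, col)
--     for member in ally_members:
--         neighbors = detect_neighbor(board, member[0], member[1])
--         for tile in neighbors:
--
--             if board[tile[0]][tile[1]] == 0: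
--                 count = count + 1
--     return count
-- ===== SOURCE B (Python) =====
-- # One grouping-free relaxation pass instead of a per-stone DFS: seed every
-- # tile_type stone that touches an empty cell, then propagate "has a liberty"
-- # through adjacent tile_type stones; dead stones are the unreached ones.
-- def find_dead_tiles(board, tile_type):
--     def neighbors(i, j):
--         return [(r, c) for (r, c) in ((i - 1, j), (i + 1, j), (i, j - 1), (i, j + 1))
--                 if 0 <= r < 5 and 0 <= c < 5]
--
--     alive = set()
--     for i in range(5):
--         for j in range(5):
--             if board[i][j] == tile_type and any(board[r][c] == 0 for (r, c) in neighbors(i, j)):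
--                 alive.add((i, j))
--     for _ in range(25):
--         for i in range(5):
--             for j in range(5):
--                 if board[i][j] == tile_type and (i, j) not in alive and \
--                         any((r, c) in alive for (r, c) in neighbors(i, j)):
--                     alive.add((i, j))
--     return [(i, j) for i in range(5) for j in range(5)
--             if board[i][j] == tile_type and (i, j) not in alive]
-- ===== Notes on version B (the rewrite author's own statement) =====
-- stated objective: simpler
-- what changed: Replaces A's per-stone group DFS (ally_dfs worklist + liberty count re-run for every stone) with one liberty-propagation scheme: seed the stones that touch an empty cell, propagate the liberty flag to adjacent same-type stones, and output the unflagged stones.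
import Mathlib
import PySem

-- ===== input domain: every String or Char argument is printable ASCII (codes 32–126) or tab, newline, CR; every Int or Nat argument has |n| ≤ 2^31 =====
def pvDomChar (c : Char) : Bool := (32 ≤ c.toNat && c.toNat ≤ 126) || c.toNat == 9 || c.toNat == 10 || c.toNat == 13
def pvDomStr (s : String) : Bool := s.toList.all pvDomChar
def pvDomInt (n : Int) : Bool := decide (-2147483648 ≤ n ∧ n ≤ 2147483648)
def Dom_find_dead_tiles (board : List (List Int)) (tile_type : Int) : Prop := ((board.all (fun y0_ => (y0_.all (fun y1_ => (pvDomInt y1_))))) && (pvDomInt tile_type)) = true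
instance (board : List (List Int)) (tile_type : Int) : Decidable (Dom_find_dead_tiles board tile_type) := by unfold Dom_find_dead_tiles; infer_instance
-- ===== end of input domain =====

-- B replaces A's per-stone DFS group search with one liberty-propagation sweep (simpler, no per-stone search);
-- A and B agree on every 5-row board whose rows have ≥ 5 columns (the game's 5×5 play area).

-- ===== PORT A =====

-- board[i][j]; total via defaults — exact wherever Python indexes in range (guaranteed by Pre_)
def getv (board : List (List Int)) (i j : Int) : Int :=
  PySem.List.pyGetD (PySem.List.pyGetD board i []) j 0

-- detect_neighbor: the `board = remove_dead_tiles(board, (i, j))` call compares int cells with a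
-- tuple tile_type, which is never equal, so it finds no dead tiles and returns the board unchanged
-- (a no-op on every board Pre_ admits); ported as the identity.
def detect_neighbor (board : List (List Int)) (i j : Int) : List (Int × Int) :=
  ([] : List (Int × Int)) ++
  (if i > 0 then [(i - 1, j)] else []) ++
  (if i < (board.length : Int) - 1 then [(i + 1, j)] else []) ++
  (if j > 0 then [(i, j - 1)] else []) ++
  (if j < (board.length : Int) - 1 then [(i, j + 1)] else [])

def detect_neighbor_ally (board : List (List Int)) (r c : Int) : List (Int × Int) :=
  (detect_neighbor board r c).foldl
    (fun acc piece => if getv board piece.1 piece.2 = getv board r c then acc ++ [piece] else acc) []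

-- the `while arr:` loop of ally_dfs; Python pops from the END of arr.  The loop runs at most once
-- per board cell (each cell is pushed at most once), so fuel 26 is never exhausted under Pre_.
def dfsLoop (board : List (List Int)) : Nat → List (Int × Int) → List (Int × Int) → List (Int × Int)
  | 0, _, members => members
  | fuel + 1, arr, members =>
    match PySem.List.pop? arr (-1) with
    | none => members          -- arr is empty: the while loop exits
    | some (piece, rest) =>
      let members' := members ++ [piece]
      let arr' := (detect_neighbor_ally board piece.1 piece.2).foldl
        (fun acc ally => if ally ∉ acc ∧ ally ∉ members' then acc ++ [ally] else acc) rest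
      dfsLoop board fuel arr' members'

def ally_dfs (board : List (List Int)) (i j : Int) : List (Int × Int) :=
  dfsLoop board 26 [(i, j)] []

def find_liberty (board : List (List Int)) (row col : Int) : Int :=
  (ally_dfs board row col).foldl
    (fun count member =>
      (detect_neighbor board member.1 member.2).foldl
        (fun c tile => if getv board tile.1 tile.2 = 0 then c + 1 else c) count) 0

def find_dead_tiles (board : List (List Int)) (tile_type : Int) : List (Int × Int) :=
  (PySem.List.pyRange 0 5 1).foldl (fun acc i =>
    (PySem.List.pyRange 0 5 1).foldl (fun acc j =>
      if getv board i j = tile_type then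
        if find_liberty board i j = 0 then acc ++ [(i, j)] else acc
      else acc) acc) []

-- ===== PORT B =====

-- Source B's `neighbors(i, j)`: in-grid orthogonal neighbours of (i, j)
def nbrsB (i j : Int) : List (Int × Int) :=
  [(i - 1, j), (i + 1, j), (i, j - 1), (i, j + 1)].filter
    (fun p => 0 ≤ p.1 ∧ p.1 < 5 ∧ 0 ≤ p.2 ∧ p.2 < 5)

-- the seeding double loop: stones of tile_type with an empty orthogonal neighbour
def seedsB (board : List (List Int)) (tile_type : Int) : PySem.Set (Int × Int) :=
  (PySem.List.pyRange 0 5 1).foldl (fun al i =>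
    (PySem.List.pyRange 0 5 1).foldl (fun al j =>
      if getv board i j = tile_type ∧ ∃ q ∈ nbrsB i j, getv board q.1 q.2 = 0
      then PySem.Set.add al (i, j) else al) al) PySem.Set.empty

-- one propagation sweep (the body of `for _ in range(25)`)
def relaxPass (board : List (List Int)) (tile_type : Int) (alive : PySem.Set (Int × Int)) :
    PySem.Set (Int × Int) :=
  (PySem.List.pyRange 0 5 1).foldl (fun al i =>
    (PySem.List.pyRange 0 5 1).foldl (fun al j =>
      if getv board i j = tile_type ∧ (i, j) ∉ al ∧ ∃ q ∈ nbrsB i j, q ∈ al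
      then PySem.Set.add al (i, j) else al) al) alive

def find_dead_tiles_alt (board : List (List Int)) (tile_type : Int) : List (Int × Int) :=
  let alive := (PySem.List.pyRange 0 25 1).foldl
    (fun al _ => relaxPass board tile_type al) (seedsB board tile_type)
  (PySem.List.pyRange 0 5 1).foldl (fun acc i =>
    (PySem.List.pyRange 0 5 1).foldl (fun acc j =>
      if getv board i j = tile_type ∧ (i, j) ∉ alive then acc ++ [(i, j)] else acc) acc) []

-- ===== PRECONDITION & SPEC =====

-- Pre_ restricts to the game's boards: 5 rows with at least 5 columns each (columns past the
-- fifth are never read).  On boards with fewer rows or shorter rows A raises IndexError inside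
-- its range(5) loops; on boards with more rows A's neighbour bounds use len(board) and read
-- cells outside the 5×5 play area, which is outside the function's natural domain.
def Pre_find_dead_tiles (board : List (List Int)) (tile_type : Int) : Prop :=
  board.length = 5 ∧ ∀ row ∈ board, 5 ≤ row.length

instance (board : List (List Int)) (tile_type : Int) : Decidable (Pre_find_dead_tiles board tile_type) := by
  unfold Pre_find_dead_tiles; infer_instance

def pvWitness_find_dead_tiles : List (List Int) × Int :=
  ([[0, 1, 0, 0, 0], [1, 2, 1, 0, 0], [0, 1, 0, 0, 0], [0, 0, 0, 0, 0], [0, 0, 0, 0, 2]], 2)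

def Spec_find_dead_tiles (board : List (List Int)) (tile_type : Int) (out : List (Int × Int)) : Prop := out = find_dead_tiles_alt board tile_type
instance (board : List (List Int)) (tile_type : Int) (out : List (Int × Int)) : Decidable (Spec_find_dead_tiles board tile_type out) := by unfold Spec_find_dead_tiles; infer_instance

-- ===== CLAIM (what is proved, stated in full; the proofs are below) =====
def Claim_equal_find_dead_tiles : Prop := ∀ (board : List (List Int)) (tile_type : Int), Dom_find_dead_tiles board tile_type → Pre_find_dead_tiles board tile_type → Spec_find_dead_tiles board tile_type (find_dead_tiles board tile_type)

-- ===== LEMMAS AND PROOFS =====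

-- the 25 cells of the board, row-major
def cellsL : List (Int × Int) :=
  ([0, 1, 2, 3, 4] : List Int).flatMap (fun i => ([0, 1, 2, 3, 4] : List Int).map (fun j => (i, j)))

def inGrid (p : Int × Int) : Prop := 0 ≤ p.1 ∧ p.1 < 5 ∧ 0 ≤ p.2 ∧ p.2 < 5

-- orthogonal adjacency (no bounds)
def adjC (p q : Int × Int) : Prop :=
  (q.1 = p.1 - 1 ∧ q.2 = p.2) ∨ (q.1 = p.1 + 1 ∧ q.2 = p.2) ∨
  (q.1 = p.1 ∧ q.2 = p.2 - 1) ∨ (q.1 = p.1 ∧ q.2 = p.2 + 1)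

-- one step between same-coloured stones on the grid
def stepC (board : List (List Int)) (t : Int) (p q : Int × Int) : Prop :=
  inGrid p ∧ inGrid q ∧ getv board p.1 p.2 = t ∧ getv board q.1 q.2 = t ∧ adjC p q

def ReachC (board : List (List Int)) (t : Int) : Int × Int → Int × Int → Prop :=
  Relation.ReflTransGen (stepC board t)

def zeroNbr (board : List (List Int)) (p : Int × Int) : Prop :=
  ∃ q ∈ nbrsB p.1 p.2, getv board q.1 q.2 = 0

-- ---------- generic fold lemmas (about our loop shapes) ----------

theorem foldl_shape_append {α : Type} (f : List α → α → List α)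
    (hf : ∀ s p, ∃ e, f s p = s ++ e) :
    ∀ (l : List α) (s : List α), ∃ e, l.foldl f s = s ++ e := by
  intro l
  induction l with
  | nil => intro s; exact ⟨[], by simp⟩
  | cons a l ih =>
    intro s
    obtain ⟨e1, he1⟩ := hf s a
    obtain ⟨e2, he2⟩ := ih (f s a)
    refine ⟨e1 ++ e2, ?_⟩
    rw [List.foldl_cons, he1, ← List.append_assoc]
    rw [he1] at he2
    exact he2

theorem foldl_shape_subset {α : Type} (f : List α → α → List α)
    (hf : ∀ s p, ∃ e, f s p = s ++ e) (l : List α) (s : List α) :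
    s ⊆ l.foldl f s := by
  obtain ⟨e, he⟩ := foldl_shape_append f hf l s
  rw [he]; exact List.subset_append_left s e

theorem foldl_invariant {α β : Type} (f : β → α → β) (S : β → Prop) (l : List α) :
    ∀ (s : β), (∀ s' p, p ∈ l → S s' → S (f s' p)) → S s → S (l.foldl f s) := by
  induction l with
  | nil => intro s _ hs; simpa using hs
  | cons a l ih =>
    intro s hstep hs
    exact ih (f s a) (fun s' p hp => hstep s' p (List.mem_cons_of_mem a hp))
      (hstep s a (List.mem_cons_self) hs)

theorem foldl_reach_mem {α : Type} (f : List α → α → List α)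
    (hf : ∀ s p, ∃ e, f s p = s ++ e) (x : α) (l : List α) :
    ∀ (s : List α), x ∈ l → (∀ s', s ⊆ s' → x ∈ f s' x) → x ∈ l.foldl f s := by
  induction l with
  | nil => intro s h; simp at h
  | cons a l ih =>
    intro s hmem hx
    rcases List.mem_cons.1 hmem with rfl | hmem'
    · have hx1 : x ∈ f s x := hx s (List.Subset.refl s)
      exact foldl_shape_subset f hf l (f s x) hx1
    · exact ih (f s a) hmem' (fun s' hs' => hx s' (Trans.trans (foldl_shape_subset f hf [a] s |>.trans (by simp)) hs'))

theorem foldl_fixed {α β : Type} (f : β → α → β) (l : List α) (s : β)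
    (h : ∀ p ∈ l, f s p = s) : l.foldl f s = s := by
  induction l with
  | nil => rfl
  | cons a l ih =>
    rw [List.foldl_cons, h a List.mem_cons_self]
    exact ih (fun p hp => h p (List.mem_cons_of_mem a hp))

-- ---------- grid facts ----------

theorem mem_cellsL (p : Int × Int) : p ∈ cellsL ↔ inGrid p := by
  obtain ⟨i, j⟩ := p
  simp only [cellsL, List.mem_flatMap, List.mem_map, List.mem_cons, List.not_mem_nil,
    or_false, Prod.mk.injEq, inGrid]
  constructor
  · rintro ⟨a, ha, b, hb, rfl, rfl⟩
    omega
  · rintro ⟨h1, h2, h3, h4⟩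
    exact ⟨i, by omega, j, by omega, rfl, rfl⟩

theorem mem_nbrsB (i j : Int) (q : Int × Int) :
    q ∈ nbrsB i j ↔ inGrid q ∧ adjC (i, j) q := by
  simp only [nbrsB, List.mem_filter, List.mem_cons, List.not_mem_nil, or_false,
    decide_eq_true_eq, inGrid, adjC]
  obtain ⟨a, b⟩ := q
  simp only [Prod.mk.injEq]
  constructor
  · rintro ⟨h1, h2⟩
    exact ⟨h2, by tauto⟩
  · rintro ⟨h1, h2⟩
    exact ⟨by tauto, h1⟩

theorem adjC_symm (p q : Int × Int) (h : adjC p q) : adjC q p := by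
  simp only [adjC] at *; omega

theorem stepC_symm (board : List (List Int)) (t : Int) (p q : Int × Int)
    (h : stepC board t p q) : stepC board t q p := by
  obtain ⟨h1, h2, h3, h4, h5⟩ := h
  exact ⟨h2, h1, h4, h3, adjC_symm p q h5⟩

theorem reachC_inGrid (board : List (List Int)) (t : Int) (s x : Int × Int)
    (hs : inGrid s) (hv : getv board s.1 s.2 = t) (h : ReachC board t s x) :
    inGrid x ∧ getv board x.1 x.2 = t := by
  induction h with
  | refl => exact ⟨hs, hv⟩
  | tail _ hstep _ => exact ⟨hstep.2.1, hstep.2.2.2.1⟩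

theorem reachC_symm (board : List (List Int)) (t : Int) (p q : Int × Int)
    (h : ReachC board t p q) : ReachC board t q p :=
  Relation.ReflTransGen.symmetric (fun _ _ hs => stepC_symm board t _ _ hs) h

-- ---------- A-side: neighbour lists ----------

theorem detect_neighbor_eq (board : List (List Int)) (i j : Int)
    (hb : board.length = 5) (hg : inGrid (i, j)) :
    detect_neighbor board i j = nbrsB i j := by
  obtain ⟨h1, h2, h3, h4⟩ := hg
  simp only at h1 h2 h3 h4
  have e1 : (0 ≤ i - 1 ∧ i - 1 < 5 ∧ 0 ≤ j ∧ j < 5) ↔ 0 < i := by omega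
  have e2 : (0 ≤ i + 1 ∧ i + 1 < 5 ∧ 0 ≤ j ∧ j < 5) ↔ i < 4 := by omega
  have e3 : (0 ≤ i ∧ i < 5 ∧ 0 ≤ j - 1 ∧ j - 1 < 5) ↔ 0 < j := by omega
  have e4 : (0 ≤ i ∧ i < 5 ∧ 0 ≤ j + 1 ∧ j + 1 < 5) ↔ j < 4 := by omega
  simp only [detect_neighbor, nbrsB, hb, List.filter_cons, List.filter_nil,
    decide_eq_true_eq, e1, e2, e3, e4]
  norm_num
  split_ifs <;> simp

theorem mem_ally (board : List (List Int)) (t : Int) (p q : Int × Int)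
    (hb : board.length = 5) (hg : inGrid p) (hv : getv board p.1 p.2 = t) :
    q ∈ detect_neighbor_ally board p.1 p.2 ↔ stepC board t p q := by
  have hdn : detect_neighbor board p.1 p.2 = nbrsB p.1 p.2 := by
    apply detect_neighbor_eq board p.1 p.2 hb
    simpa [inGrid] using hg
  simp only [detect_neighbor_ally, hdn, hv,
    PySem.List.foldl_append_ite_eq_filter, List.nil_append, List.mem_filter,
    decide_eq_true_eq]
  rw [mem_nbrsB]
  simp only [stepC]
  constructor
  · rintro ⟨⟨hq, hadj⟩, hval⟩
    refine ⟨hg, hq, hv, hval, ?_⟩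
    simpa [adjC] using hadj
  · rintro ⟨_, hq, _, hval, hadj⟩
    exact ⟨⟨hq, by simpa [adjC] using hadj⟩, hval⟩

-- ---------- A-side: the ally_dfs worklist computes exactly the reachable set ----------

theorem pushAll (members' : List (Int × Int)) (L : List (Int × Int)) :
    ∀ (acc : List (Int × Int)), acc.Nodup → (∀ x ∈ acc, x ∉ members') →
      (L.foldl (fun acc a => if a ∉ acc ∧ a ∉ members' then acc ++ [a] else acc) acc).Nodup ∧
      (∀ x ∈ L.foldl (fun acc a => if a ∉ acc ∧ a ∉ members' then acc ++ [a] else acc) acc, x ∉ members') ∧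
      (∀ x ∈ L.foldl (fun acc a => if a ∉ acc ∧ a ∉ members' then acc ++ [a] else acc) acc, x ∈ acc ∨ x ∈ L) ∧
      (∀ x ∈ acc, x ∈ L.foldl (fun acc a => if a ∉ acc ∧ a ∉ members' then acc ++ [a] else acc) acc) ∧
      (∀ a ∈ L, a ∈ L.foldl (fun acc a => if a ∉ acc ∧ a ∉ members' then acc ++ [a] else acc) acc ∨ a ∈ members') := by
  induction L with
  | nil =>
    intro acc h1 h2
    refine ⟨h1, h2, ?_, ?_, ?_⟩ <;> simp_all
  | cons a L ih =>
    intro acc h1 h2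
    simp only [List.foldl_cons]
    by_cases hc : a ∉ acc ∧ a ∉ members'
    · rw [if_pos hc]
      have h1' : (acc ++ [a]).Nodup := by
        simp only [List.nodup_append, List.nodup_cons, List.not_mem_nil, not_false_iff,
          List.nodup_nil, and_true, true_and]
        refine ⟨h1, fun x hx b hb => ?_⟩
        simp only [List.mem_singleton] at hb
        subst hb
        exact fun he => hc.1 (he ▸ hx)
      have h2' : ∀ x ∈ acc ++ [a], x ∉ members' := by
        intro x hx
        rcases List.mem_append.1 hx with hx | hx
        · exact h2 x hx
        · simp at hx; subst hx; exact hc.2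
      obtain ⟨c1, c2, c3, c4, c5⟩ := ih (acc ++ [a]) h1' h2'
      refine ⟨c1, c2, ?_, ?_, ?_⟩
      · intro x hx
        rcases c3 x hx with hx' | hx'
        · rcases List.mem_append.1 hx' with h | h
          · exact Or.inl h
          · simp at h; subst h; simp
        · simp [hx']
      · intro x hx
        exact c4 x (List.mem_append.2 (Or.inl hx))
      · intro b hb
        rcases List.mem_cons.1 hb with rfl | hb'
        · exact Or.inl (c4 b (by simp))
        · exact c5 b hb'
    · rw [if_neg hc]
      obtain ⟨c1, c2, c3, c4, c5⟩ := ih acc h1 h2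
      have hc' : a ∈ acc ∨ a ∈ members' := by
        by_cases h : a ∈ acc
        · exact Or.inl h
        · refine Or.inr ?_
          by_cases h' : a ∈ members'
          · exact h'
          · exact absurd ⟨h, h'⟩ hc
      refine ⟨c1, c2, ?_, c4, ?_⟩
      · intro x hx
        rcases c3 x hx with hx' | hx'
        · exact Or.inl hx'
        · simp [hx']
      · intro b hb
        rcases List.mem_cons.1 hb with rfl | hb'
        · rcases hc' with hba | hba
          · exact Or.inl (c4 b hba)
          · exact Or.inr hba
        · exact c5 b hb'

theorem members_le_25 (members : List (Int × Int)) (h1 : members.Nodup)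
    (h2 : ∀ x ∈ members, inGrid x) : members.length ≤ 25 := by
  have hsub : members ⊆ cellsL := fun x hx => (mem_cellsL x).2 (h2 x hx)
  have hlen := (h1.subperm hsub).length_le
  have : cellsL.length = 25 := by decide
  omega

theorem dfs_main (board : List (List Int)) (t : Int) (hb : board.length = 5)
    (s : Int × Int) (hs : inGrid s) (hv : getv board s.1 s.2 = t) :
    ∀ (fuel : Nat) (arr members : List (Int × Int)),
      (∀ x ∈ arr, ReachC board t s x) →
      (∀ x ∈ members, ReachC board t s x) →
      (∀ m ∈ members, ∀ q, stepC board t m q → q ∈ arr ∨ q ∈ members) →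
      arr.Nodup → members.Nodup → (∀ x ∈ arr, x ∉ members) →
      25 < fuel + members.length →
      (∀ x ∈ dfsLoop board fuel arr members, ReachC board t s x) ∧
      (∀ x, (x ∈ arr ∨ x ∈ members) → x ∈ dfsLoop board fuel arr members) ∧
      (∀ m ∈ dfsLoop board fuel arr members, ∀ q, stepC board t m q →
        q ∈ dfsLoop board fuel arr members) := by
  intro fuel
  induction fuel with
  | zero =>
    intro arr members _ hm _ _ hnm _ hlen
    exfalso
    have : members.length ≤ 25 :=
      members_le_25 members hnm
        (fun x hx => (reachC_inGrid board t s x hs hv (hm x hx)).1)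
    omega
  | succ fuel ih =>
    intro arr members ha hm hcl hna hnm hd hlen
    rcases List.eq_nil_or_concat arr with rfl | ⟨rest, piece, rfl⟩
    · have hval : dfsLoop board (fuel + 1) [] members = members := rfl
      rw [hval]
      refine ⟨hm, ?_, ?_⟩
      · rintro x (hx | hx)
        · simp at hx
        · exact hx
      · intro m hm' q hq
        rcases hcl m hm' q hq with h | h
        · simp at h
        · exact h
    · -- one iteration: pop piece from the end of arr
      simp only [List.concat_eq_append] at ha hm hcl hna hd ⊢
      have hpieceR : ReachC board t s piece := ha piece (by simp)
      obtain ⟨hpieceG, hpieceV⟩ := reachC_inGrid board t s piece hs hv hpieceR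
      have hrest : ∀ x ∈ rest, x ∈ rest ++ [piece] := fun x hx => by simp [hx]
      have hnr : rest.Nodup ∧ piece ∉ rest := by
        have h := hna
        simp only [List.nodup_append, List.nodup_cons, List.not_mem_nil, not_false_iff,
          List.nodup_nil, and_true, true_and] at h
        exact ⟨h.1, fun hp => h.2 piece hp piece (by simp) rfl⟩
      have hdis : ∀ x ∈ rest, x ∉ members ++ [piece] := by
        intro x hx
        simp only [List.mem_append, List.mem_singleton]
        rintro (hxm | rfl)
        · exact hd x (hrest x hx) hxm
        · exact hnr.2 hx
      obtain ⟨c1, c2, c3, c4, c5⟩ :=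
        pushAll (members ++ [piece]) (detect_neighbor_ally board piece.1 piece.2) rest hnr.1 hdis
      have hred : dfsLoop board (fuel + 1) (rest ++ [piece]) members =
          dfsLoop board fuel
            ((detect_neighbor_ally board piece.1 piece.2).foldl
              (fun acc ally => if ally ∉ acc ∧ ally ∉ members ++ [piece] then acc ++ [ally] else acc)
              rest)
            (members ++ [piece]) := by
        simp only [dfsLoop, PySem.List.pop?_last]
      rw [hred]
      have hstep_of_mem : ∀ q ∈ detect_neighbor_ally board piece.1 piece.2, stepC board t piece q :=
        fun q hq => (mem_ally board t piece q hb hpieceG hpieceV).1 hq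
      have ih' := ih
        ((detect_neighbor_ally board piece.1 piece.2).foldl
          (fun acc ally => if ally ∉ acc ∧ ally ∉ members ++ [piece] then acc ++ [ally] else acc)
          rest)
        (members ++ [piece])
        (by -- soundness of arr'
          intro x hx
          rcases c3 x hx with hx' | hx'
          · exact ha x (hrest x hx')
          · exact hpieceR.tail (hstep_of_mem x hx'))
        (by -- soundness of members'
          intro x hx
          rcases List.mem_append.1 hx with hx' | hx'
          · exact hm x hx'
          · simp at hx'; subst hx'; exact hpieceR)
        (by -- closure progress for members'
          intro m hm' q hq
          rcases List.mem_append.1 hm' with hmm | hmm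
          · rcases hcl m hmm q hq with hqa | hqa
            · rcases List.mem_append.1 hqa with h | h
              · exact Or.inl (c4 q h)
              · simp at h; subst h; exact Or.inr (by simp)
            · exact Or.inr (by simp [hqa])
          · have hmp : m = piece := by simpa using hmm
            have hq' : q ∈ detect_neighbor_ally board piece.1 piece.2 :=
              (mem_ally board t piece q hb hpieceG hpieceV).2 (hmp ▸ hq)
            exact c5 q hq')
        c1
        (by -- members' nodup
          have hpm : piece ∉ members := fun h => hd piece (by simp) h
          simp only [List.nodup_append, List.nodup_cons, List.not_mem_nil, not_false_iff,
            List.nodup_nil, and_true, true_and]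
          refine ⟨hnm, fun x hx b hb => ?_⟩
          simp only [List.mem_singleton] at hb
          subst hb
          exact fun he => hpm (he ▸ hx))
        c2
        (by simp at hlen ⊢; omega)
      refine ⟨ih'.1, ?_, ih'.2.2⟩
      rintro x (hx | hx)
      · rcases List.mem_append.1 hx with hx' | hx'
        · exact ih'.2.1 x (Or.inl (c4 x hx'))
        · simp at hx'; subst hx'; exact ih'.2.1 x (Or.inr (by simp))
      · exact ih'.2.1 x (Or.inr (by simp [hx]))

theorem ally_spec (board : List (List Int)) (t : Int) (hb : board.length = 5)
    (i j : Int) (hg : inGrid (i, j)) (hv : getv board i j = t) (x : Int × Int) :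
    x ∈ ally_dfs board i j ↔ ReachC board t (i, j) x := by
  have H := dfs_main board t hb (i, j) hg hv 26 [(i, j)] []
    (by rintro x hx; simp at hx; subst hx; exact Relation.ReflTransGen.refl)
    (by simp) (by simp) (by simp) (by simp) (by simp) (by omega)
  constructor
  · exact fun hx => H.1 x hx
  · intro hr
    induction hr with
    | refl => exact H.2.1 (i, j) (Or.inl (by simp))
    | tail _ hbc ihr => exact H.2.2 _ ihr _ hbc

-- ---------- loop-shape identities: both ports as folds over the cell list ----------

def iterN (board : List (List Int)) (t : Int) : Nat → PySem.Set (Int × Int) → PySem.Set (Int × Int)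
  | 0, s => s
  | n + 1, s => iterN board t n (relaxPass board t s)

theorem nested55 {β : Type} (g : β → (Int × Int) → β) (init : β) :
    (PySem.List.pyRange 0 5 1).foldl
      (fun acc i => (PySem.List.pyRange 0 5 1).foldl (fun acc j => g acc (i, j)) acc) init
    = cellsL.foldl g init := by
  have hr : PySem.List.pyRange 0 5 1 = ([0, 1, 2, 3, 4] : List Int) := by decide
  have hc : cellsL =
      [(0,0),(0,1),(0,2),(0,3),(0,4),(1,0),(1,1),(1,2),(1,3),(1,4),
       (2,0),(2,1),(2,2),(2,3),(2,4),(3,0),(3,1),(3,2),(3,3),(3,4),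
       (4,0),(4,1),(4,2),(4,3),(4,4)] := by decide
  rw [hr, hc]
  simp only [List.foldl_cons, List.foldl_nil]

theorem fold25_eq_iterN (board : List (List Int)) (t : Int) (s : PySem.Set (Int × Int)) :
    (PySem.List.pyRange 0 25 1).foldl (fun al _ => relaxPass board t al) s = iterN board t 25 s := by
  have hr : PySem.List.pyRange 0 25 1 =
      ([0,1,2,3,4,5,6,7,8,9,10,11,12,13,14,15,16,17,18,19,20,21,22,23,24] : List Int) := by decide
  rw [hr]
  simp only [List.foldl_cons, List.foldl_nil, iterN]

theorem A_out_eq (board : List (List Int)) (t : Int) :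
    find_dead_tiles board t =
      cellsL.foldl (fun acc p =>
        if getv board p.1 p.2 = t then
          if find_liberty board p.1 p.2 = 0 then acc ++ [p] else acc
        else acc) [] := by
  unfold find_dead_tiles
  exact nested55 (fun acc p =>
    if getv board p.1 p.2 = t then
      if find_liberty board p.1 p.2 = 0 then acc ++ [p] else acc
    else acc) []

theorem seedsB_eq (board : List (List Int)) (t : Int) :
    seedsB board t =
      cellsL.foldl (fun (al : PySem.Set (Int × Int)) (p : Int × Int) =>
        if getv board p.1 p.2 = t ∧ ∃ q ∈ nbrsB p.1 p.2, getv board q.1 q.2 = 0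
        then PySem.Set.add al p else al) (PySem.Set.empty : PySem.Set (Int × Int)) := by
  unfold seedsB
  exact nested55 (fun (al : PySem.Set (Int × Int)) (p : Int × Int) =>
    if getv board p.1 p.2 = t ∧ ∃ q ∈ nbrsB p.1 p.2, getv board q.1 q.2 = 0
    then PySem.Set.add al p else al) PySem.Set.empty

theorem relaxPass_eq (board : List (List Int)) (t : Int) (al : PySem.Set (Int × Int)) :
    relaxPass board t al =
      cellsL.foldl (fun al p =>
        if getv board p.1 p.2 = t ∧ p ∉ al ∧ ∃ q ∈ nbrsB p.1 p.2, q ∈ al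
        then PySem.Set.add al p else al) al := by
  unfold relaxPass
  exact nested55 (fun al' p =>
    if getv board p.1 p.2 = t ∧ p ∉ al' ∧ ∃ q ∈ nbrsB p.1 p.2, q ∈ al'
    then PySem.Set.add al' p else al') al

theorem B_out_eq (board : List (List Int)) (t : Int) :
    find_dead_tiles_alt board t =
      cellsL.foldl (fun acc p =>
        if getv board p.1 p.2 = t ∧ p ∉ iterN board t 25 (seedsB board t) then acc ++ [p] else acc)
        [] := by
  simp only [find_dead_tiles_alt, fold25_eq_iterN]
  exact nested55 (fun acc p =>
    if getv board p.1 p.2 = t ∧ p ∉ iterN board t 25 (seedsB board t) then acc ++ [p] else acc) []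

-- ---------- A-side: find_liberty == 0 means the group touches no empty cell ----------

theorem ally_spec' (board : List (List Int)) (t : Int) (hb : board.length = 5)
    (p : Int × Int) (hg : inGrid p) (hv : getv board p.1 p.2 = t) (x : Int × Int) :
    x ∈ ally_dfs board p.1 p.2 ↔ ReachC board t p x := by
  have hp : ((p.1, p.2) : Int × Int) = p := rfl
  have := ally_spec board t hb p.1 p.2 (by simpa [inGrid] using hg) hv x
  rwa [hp] at this

theorem liberty_zero_iff (board : List (List Int)) (t : Int) (hb : board.length = 5)
    (p : Int × Int) (hg : inGrid p) (hv : getv board p.1 p.2 = t) :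
    find_liberty board p.1 p.2 = 0 ↔ ¬ ∃ x, ReachC board t p x ∧ zeroNbr board x := by
  unfold find_liberty
  have hcong : ∀ (acc : Int), ∀ m ∈ ally_dfs board p.1 p.2,
      (detect_neighbor board m.1 m.2).foldl
        (fun c tile => if getv board tile.1 tile.2 = 0 then c + 1 else c) acc
      = acc + (((nbrsB m.1 m.2).countP (fun q => decide (getv board q.1 q.2 = 0)) : Nat) : Int) := by
    intro acc m hm
    have hmG : inGrid m :=
      (reachC_inGrid board t p m hg hv ((ally_spec' board t hb p hg hv m).1 hm)).1
    rw [detect_neighbor_eq board m.1 m.2 hb (by simpa [inGrid] using hmG)]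
    simpa using
      PySem.List.foldl_count_if (fun q : Int × Int => decide (getv board q.1 q.2 = 0))
        (nbrsB m.1 m.2) acc
  rw [PySem.List.foldl_congr_mem (ally_dfs board p.1 p.2) _ _ 0 hcong,
    PySem.List.foldl_add, zero_add]
  rw [show List.map
        (fun m => (((nbrsB m.1 m.2).countP (fun q => decide (getv board q.1 q.2 = 0)) : Nat) : Int))
        (ally_dfs board p.1 p.2)
      = List.map Nat.cast (List.map
          (fun m => (nbrsB m.1 m.2).countP (fun q => decide (getv board q.1 q.2 = 0)))
          (ally_dfs board p.1 p.2)) from by rw [List.map_map]; rfl]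
  rw [← Nat.cast_list_sum, Int.natCast_eq_zero, List.sum_eq_zero_iff]
  constructor
  · rintro h ⟨x, hrx, q, hq, hq0⟩
    have hx : x ∈ ally_dfs board p.1 p.2 := (ally_spec' board t hb p hg hv x).2 hrx
    have hcnt := h _ (List.mem_map_of_mem (l := ally_dfs board p.1 p.2) hx)
    have := List.countP_eq_zero.1 hcnt q hq
    simp [hq0] at this
  · intro h n hn
    obtain ⟨m, hm, rfl⟩ := List.mem_map.1 hn
    refine List.countP_eq_zero.2 (fun q hq hpz => h ?_)
    refine ⟨m, (ally_spec' board t hb p hg hv m).1 hm, q, hq, ?_⟩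
    simpa using hpz

-- ---------- B-side: Set.add basics ----------

theorem add_shape (s : PySem.Set (Int × Int)) (x : Int × Int) :
    ∃ e, PySem.Set.add s x = s ++ e := by
  unfold PySem.Set.add
  split
  · exact ⟨[], by simp⟩
  · exact ⟨[x], rfl⟩

theorem mem_foldl_add_if (C : (Int × Int) → Prop) [DecidablePred C] (l : List (Int × Int)) :
    ∀ (s : PySem.Set (Int × Int)) (x : Int × Int),
      x ∈ l.foldl (fun al p => if C p then PySem.Set.add al p else al) s ↔
        x ∈ s ∨ (x ∈ l ∧ C x) := by
  induction l with
  | nil => intro s x; simp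
  | cons a l ih =>
    intro s x
    rw [List.foldl_cons]
    by_cases hc : C a
    · rw [if_pos hc, ih]
      rw [PySem.Set.mem_add]
      constructor
      · rintro ((hs | rfl) | ⟨hl, hC⟩)
        · exact Or.inl hs
        · exact Or.inr ⟨by simp, hc⟩
        · exact Or.inr ⟨by simp [hl], hC⟩
      · rintro (hs | ⟨hl, hC⟩)
        · exact Or.inl (Or.inl hs)
        · rcases List.mem_cons.1 hl with rfl | hl'
          · exact Or.inl (Or.inr rfl)
          · exact Or.inr ⟨hl', hC⟩
    · rw [if_neg hc, ih]
      constructor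
      · rintro (hs | ⟨hl, hC⟩)
        · exact Or.inl hs
        · exact Or.inr ⟨by simp [hl], hC⟩
      · rintro (hs | ⟨hl, hC⟩)
        · exact Or.inl hs
        · rcases List.mem_cons.1 hl with rfl | hl'
          · exact absurd hC hc
          · exact Or.inr ⟨hl', hC⟩

theorem seeds_mem (board : List (List Int)) (t : Int) (x : Int × Int) :
    x ∈ seedsB board t ↔ inGrid x ∧ getv board x.1 x.2 = t ∧ zeroNbr board x := by
  rw [seedsB_eq, mem_foldl_add_if
    (fun p => getv board p.1 p.2 = t ∧ ∃ q ∈ nbrsB p.1 p.2, getv board q.1 q.2 = 0) cellsL]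
  simp only [PySem.Set.empty, List.not_mem_nil, false_or, mem_cellsL, zeroNbr]

-- ---------- B-side: the propagation reaches exactly the groups with a liberty ----------

theorem relax_shape (board : List (List Int)) (t : Int) (al : PySem.Set (Int × Int)) :
    ∃ e, relaxPass board t al = al ++ e := by
  rw [relaxPass_eq]
  apply foldl_shape_append
  intro s p
  by_cases hc : getv board p.1 p.2 = t ∧ p ∉ s ∧ ∃ q ∈ nbrsB p.1 p.2, q ∈ s
  · rw [if_pos hc]; exact add_shape s p
  · rw [if_neg hc]; exact ⟨[], by simp⟩

theorem relax_subset (board : List (List Int)) (t : Int) (al : PySem.Set (Int × Int)) :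
    al ⊆ relaxPass board t al := by
  obtain ⟨e, he⟩ := relax_shape board t al
  rw [he]; exact List.subset_append_left al e

theorem relax_inv (board : List (List Int)) (t : Int) (al : PySem.Set (Int × Int))
    (h : al.Nodup ∧ al ⊆ cellsL) : (relaxPass board t al).Nodup ∧ relaxPass board t al ⊆ cellsL := by
  rw [relaxPass_eq]
  apply foldl_invariant _ (fun s => s.Nodup ∧ s ⊆ cellsL) cellsL al _ h
  intro s p hp hS
  by_cases hc : getv board p.1 p.2 = t ∧ p ∉ s ∧ ∃ q ∈ nbrsB p.1 p.2, q ∈ s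
  · rw [if_pos hc]
    refine ⟨PySem.Set.nodup_add s p hS.1, ?_⟩
    intro y hy
    rcases (PySem.Set.mem_add s p y).1 hy with hy' | rfl
    · exact hS.2 hy'
    · exact hp
  · rw [if_neg hc]; exact hS

theorem relax_S (board : List (List Int)) (t : Int) (al : PySem.Set (Int × Int))
    (h : ∀ x ∈ al, inGrid x ∧ getv board x.1 x.2 = t ∧ ∃ q, ReachC board t x q ∧ zeroNbr board q) :
    ∀ x ∈ relaxPass board t al,
      inGrid x ∧ getv board x.1 x.2 = t ∧ ∃ q, ReachC board t x q ∧ zeroNbr board q := by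
  rw [relaxPass_eq]
  apply foldl_invariant _
    (fun s => ∀ x ∈ s, inGrid x ∧ getv board x.1 x.2 = t ∧ ∃ q, ReachC board t x q ∧ zeroNbr board q)
    cellsL al _ h
  intro s p hp hS
  by_cases hc : getv board p.1 p.2 = t ∧ p ∉ s ∧ ∃ q ∈ nbrsB p.1 p.2, q ∈ s
  · rw [if_pos hc]
    intro x hx
    rcases (PySem.Set.mem_add s p x).1 hx with hx' | rfl
    · exact hS x hx'
    · obtain ⟨hvp, _, q0, hq0n, hq0s⟩ := hc
      obtain ⟨hq0G, hq0v, qq, hreach, hz⟩ := hS q0 hq0s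
      have hpG : inGrid x := (mem_cellsL x).1 hp
      have hstep : stepC board t x q0 := by
        obtain ⟨hq0G', hadj⟩ := (mem_nbrsB x.1 x.2 q0).1 hq0n
        exact ⟨hpG, hq0G', hvp, hq0v, by simpa [adjC] using hadj⟩
      exact ⟨hpG, hvp, qq, Relation.ReflTransGen.head hstep hreach, hz⟩
  · rw [if_neg hc]; exact hS

theorem mem_relax_of (board : List (List Int)) (t : Int) (al : PySem.Set (Int × Int))
    (x : Int × Int) (hG : inGrid x) (hv : getv board x.1 x.2 = t)
    (hn : ∃ q ∈ nbrsB x.1 x.2, q ∈ al) : x ∈ relaxPass board t al := by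
  rw [relaxPass_eq]
  apply foldl_reach_mem
  · intro s p
    by_cases hc : getv board p.1 p.2 = t ∧ p ∉ s ∧ ∃ q ∈ nbrsB p.1 p.2, q ∈ s
    · rw [if_pos hc]; exact add_shape s p
    · rw [if_neg hc]; exact ⟨[], by simp⟩
  · exact (mem_cellsL x).2 hG
  · intro s' hsub
    by_cases hx : x ∈ s'
    · by_cases hc : getv board x.1 x.2 = t ∧ x ∉ s' ∧ ∃ q ∈ nbrsB x.1 x.2, q ∈ s'
      · rw [if_pos hc]; exact (PySem.Set.mem_add s' x x).2 (Or.inl hx)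
      · rw [if_neg hc]; exact hx
    · obtain ⟨q0, hq0, hq0al⟩ := hn
      rw [if_pos ⟨hv, hx, q0, hq0, hsub hq0al⟩]
      exact (PySem.Set.mem_add s' x x).2 (Or.inr rfl)

theorem iter_subset (board : List (List Int)) (t : Int) :
    ∀ (n : Nat) (s : PySem.Set (Int × Int)), s ⊆ iterN board t n s := by
  intro n
  induction n with
  | zero => intro s; exact fun _ h => h
  | succ n ih =>
    intro s
    exact (relax_subset board t s).trans (ih (relaxPass board t s))

theorem iter_S (board : List (List Int)) (t : Int) :
    ∀ (n : Nat) (s : PySem.Set (Int × Int)),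
      (∀ x ∈ s, inGrid x ∧ getv board x.1 x.2 = t ∧ ∃ q, ReachC board t x q ∧ zeroNbr board q) →
      ∀ x ∈ iterN board t n s,
        inGrid x ∧ getv board x.1 x.2 = t ∧ ∃ q, ReachC board t x q ∧ zeroNbr board q := by
  intro n
  induction n with
  | zero => intro s h; exact h
  | succ n ih => intro s h; exact ih (relaxPass board t s) (relax_S board t s h)

theorem iter_of_fix (board : List (List Int)) (t : Int)
    (s : PySem.Set (Int × Int)) (h : relaxPass board t s = s) :
    ∀ n, iterN board t n s = s := by
  intro n
  induction n with
  | zero => rfl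
  | succ n ih =>
    show iterN board t n (relaxPass board t s) = s
    rw [h]; exact ih

theorem fix_reached (board : List (List Int)) (t : Int) :
    ∀ (n : Nat) (s : PySem.Set (Int × Int)), s.Nodup → s ⊆ cellsL → 25 ≤ n + s.length →
      relaxPass board t (iterN board t n s) = iterN board t n s := by
  intro n
  induction n with
  | zero =>
    intro s hnd hsub hlen
    show relaxPass board t s = s
    have hsup : cellsL ⊆ s := by
      have hsp := hnd.subperm hsub
      have hcl : cellsL.length = 25 := by decide
      have hperm : s.Perm cellsL := by
        apply hsp.perm_of_length_le
        simp at hlen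
        omega
      intro y hy
      exact hperm.symm.subset hy
    rw [relaxPass_eq]
    apply foldl_fixed
    intro p hp
    have hps : p ∈ s := hsup hp
    rw [if_neg]
    rintro ⟨_, hns, _⟩
    exact hns hps
  | succ n ih =>
    intro s hnd hsub hlen
    by_cases hfx : relaxPass board t s = s
    · have h1 : iterN board t (n + 1) s = s := iter_of_fix board t s hfx (n + 1)
      rw [h1, hfx]
    · show relaxPass board t (iterN board t n (relaxPass board t s)) =
        iterN board t n (relaxPass board t s)
      have hinv := relax_inv board t s ⟨hnd, hsub⟩
      obtain ⟨e, he⟩ := relax_shape board t s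
      have hgrow : s.length < (relaxPass board t s).length := by
        rcases e with _ | ⟨a, e'⟩
        · exact absurd (by simpa using he) hfx
        · rw [he]; simp
      exact ih (relaxPass board t s) hinv.1 hinv.2 (by omega)

theorem seeds_inv (board : List (List Int)) (t : Int) :
    (seedsB board t).Nodup ∧ seedsB board t ⊆ cellsL := by
  constructor
  · rw [seedsB_eq]
    refine foldl_invariant _ (fun s : PySem.Set (Int × Int) => s.Nodup) cellsL PySem.Set.empty
      ?_ (by simp [PySem.Set.empty])
    intro s p _ hS
    by_cases hc : getv board p.1 p.2 = t ∧ ∃ q ∈ nbrsB p.1 p.2, getv board q.1 q.2 = 0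
    · rw [if_pos hc]; exact PySem.Set.nodup_add s p hS
    · rw [if_neg hc]; exact hS
  · intro x hx
    exact (mem_cellsL x).2 ((seeds_mem board t x).1 hx).1

theorem alive_iff (board : List (List Int)) (t : Int) (x : Int × Int) :
    x ∈ iterN board t 25 (seedsB board t) ↔
      inGrid x ∧ getv board x.1 x.2 = t ∧ ∃ q, ReachC board t x q ∧ zeroNbr board q := by
  have hfix : relaxPass board t (iterN board t 25 (seedsB board t)) =
      iterN board t 25 (seedsB board t) :=
    fix_reached board t 25 (seedsB board t) (seeds_inv board t).1 (seeds_inv board t).2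
      (by omega)
  constructor
  · apply iter_S
    intro y hy
    obtain ⟨hG, hv, hz⟩ := (seeds_mem board t y).1 hy
    exact ⟨hG, hv, y, Relation.ReflTransGen.refl, hz⟩
  · rintro ⟨hG, hv, q, hr, hz⟩
    obtain ⟨hqG, hqv⟩ := reachC_inGrid board t x q hG hv hr
    have hqseed : q ∈ seedsB board t := (seeds_mem board t q).2 ⟨hqG, hqv, hz⟩
    have hqalive : q ∈ iterN board t 25 (seedsB board t) :=
      iter_subset board t 25 (seedsB board t) hqseed
    have hrev : ReachC board t q x := reachC_symm board t x q hr
    clear hr hz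
    induction hrev with
    | refl => exact hqalive
    | tail _ hbc ihr =>
      rename_i b c _
      have hbmem := ihr hbc.1 hbc.2.2.1
      have hcG : inGrid c := hbc.2.1
      have hcv : getv board c.1 c.2 = t := hbc.2.2.2.1
      have hbn : b ∈ nbrsB c.1 c.2 := by
        rw [mem_nbrsB]
        exact ⟨hbc.1, adjC_symm b c (by simpa [adjC] using hbc.2.2.2.2)⟩
      rw [← hfix]
      exact mem_relax_of board t _ c hcG hcv ⟨b, hbn, hbmem⟩

theorem find_dead_tiles_spec : Claim_equal_find_dead_tiles := by
  unfold Claim_equal_find_dead_tiles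
  intro board t _ hpre
  unfold Spec_find_dead_tiles
  obtain ⟨hb, _⟩ := hpre
  rw [A_out_eq, B_out_eq]
  have hA : ∀ (acc : List (Int × Int)), ∀ p ∈ cellsL,
      (if getv board p.1 p.2 = t then
        if find_liberty board p.1 p.2 = 0 then acc ++ [p] else acc
      else acc)
      = (if getv board p.1 p.2 = t ∧ find_liberty board p.1 p.2 = 0 then acc ++ [p] else acc) := by
    intro acc p _
    by_cases h1 : getv board p.1 p.2 = t <;> by_cases h2 : find_liberty board p.1 p.2 = 0 <;>
      simp [h1, h2]
  rw [PySem.List.foldl_congr_mem cellsL _ _ [] hA]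
  rw [PySem.List.foldl_append_ite_eq_filter
    (fun p => getv board p.1 p.2 = t ∧ find_liberty board p.1 p.2 = 0) cellsL []]
  rw [PySem.List.foldl_append_ite_eq_filter
    (fun p => getv board p.1 p.2 = t ∧ p ∉ iterN board t 25 (seedsB board t)) cellsL []]
  simp only [List.nil_append]
  apply List.filter_congr
  intro p hp
  have hG : inGrid p := (mem_cellsL p).1 hp
  simp only [decide_eq_decide]
  by_cases hv : getv board p.1 p.2 = t
  · simp only [hv, true_and]
    rw [liberty_zero_iff board t hb p hG hv, alive_iff board t p]
    simp [hG, hv]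
  · simp [hv]
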